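-- pv_equiv track=rewrite | github.com/dubnubdubnub/dubIS | tools/dev-tools-mcp/server.py | _find_block_end_indent
-- ===== SOURCE A (Python) =====
-- def _find_block_end_indent(lines: list[str], start_idx: int) -> int:
--     """Find end of an indentation-based block (Python)."""
--     if start_idx >= len(lines):
--         return start_idx
--
--     def_indent = len(lines[start_idx]) - len(lines[start_idx].lstrip())
--
--     last_content_line = start_idx
--     for i in range(start_idx + 1, len(lines)):
--         stripped = lines[i].strip()
--         if not stripped:
--             continue
--         current_indent = len(lines[i]) - len(lines[i].lstrip())
--         if current_indent <= def_indent: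
--             break
--         last_content_line = i
--
--     return last_content_line
-- ===== SOURCE B (Python) =====
-- def _find_block_end_indent(lines: list[str], start_idx: int) -> int:
--     """Find end of an indentation-based block (Python)."""
--     if start_idx >= len(lines):
--         return start_idx
--
--     def_indent = len(lines[start_idx]) - len(lines[start_idx].lstrip())
--
--     # Pass 1: boundary = first non-blank line at or below def_indent (len(lines) if none).
--     boundary = len(lines)
--     for i in range(start_idx + 1, len(lines)):
--         if not lines[i].strip():
--             continue
--         if len(lines[i]) - len(lines[i].lstrip()) <= def_indent:
--             boundary = i
--             break
--
--     # Pass 2: trim trailing blanks — last non-blank line before the boundary.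
--     for j in reversed(range(start_idx + 1, boundary)):
--         if lines[j].strip():
--             return j
--     return start_idx
-- ===== Notes on version B (the rewrite author's own statement) =====
-- stated objective: alternative
-- what changed: A's single stateful forward scan carrying a last_content_line accumulator is replaced by two stateless passes: a forward scan for the first non-blank line at or below the def's indent (the block boundary), then a backward scan from that boundary trimming trailing blank lines.
import Mathlib
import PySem

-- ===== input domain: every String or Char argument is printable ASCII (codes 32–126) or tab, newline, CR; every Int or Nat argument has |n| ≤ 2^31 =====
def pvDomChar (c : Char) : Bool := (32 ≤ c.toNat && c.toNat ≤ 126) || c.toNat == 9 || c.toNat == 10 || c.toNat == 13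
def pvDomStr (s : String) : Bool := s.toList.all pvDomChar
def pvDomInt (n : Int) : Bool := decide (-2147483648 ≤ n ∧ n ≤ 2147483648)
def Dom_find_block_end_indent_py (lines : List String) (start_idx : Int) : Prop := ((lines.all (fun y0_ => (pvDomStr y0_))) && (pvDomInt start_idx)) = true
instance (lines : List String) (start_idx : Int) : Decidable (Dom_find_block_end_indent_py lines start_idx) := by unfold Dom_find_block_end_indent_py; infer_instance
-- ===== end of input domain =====

-- B splits A's single stateful scan into two stateless passes: a forward scan for the
-- block boundary, then a backward scan trimming trailing blank lines (objective: alternative).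

-- ===== PORT A =====
def pvA_indent (line : String) : Int :=
  PySem.Str.len line - PySem.Str.len (PySem.Str.lstrip line)

def pvA_loop (lines : List String) (d : Int) (idxs : List Int) (last : Int) : Int :=
  match idxs with
  | [] => last
  | i :: rest =>
    let line := (PySem.List.pyGet? lines i).getD ""
    if PySem.Str.strip line = "" then pvA_loop lines d rest last
    else if pvA_indent line ≤ d then last
    else pvA_loop lines d rest i

def find_block_end_indent_py (lines : List String) (start_idx : Int) : Int :=
  if start_idx ≥ PySem.List.len lines then start_idx
  else
    let def_indent := pvA_indent ((PySem.List.pyGet? lines start_idx).getD "")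
    pvA_loop lines def_indent
      (PySem.List.pyRange (start_idx + 1) (PySem.List.len lines) 1) start_idx

-- ===== PORT B =====
def pvB_indent (line : String) : Int :=
  PySem.Str.len line - PySem.Str.len (PySem.Str.lstrip line)

def pvB_blank (line : String) : Bool := PySem.Str.strip line = ""

-- pass 1: first index whose line is non-blank with indent ≤ d; default dflt
def pvB_boundary (lines : List String) (d : Int) (idxs : List Int) (dflt : Int) : Int :=
  match idxs with
  | [] => dflt
  | i :: rest =>
    if pvB_blank ((PySem.List.pyGet? lines i).getD "") then pvB_boundary lines d rest dflt
    else if pvB_indent ((PySem.List.pyGet? lines i).getD "") ≤ d then i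
    else pvB_boundary lines d rest dflt

-- pass 2: first index (scanning the given, already reversed, list) whose line is non-blank
def pvB_back (lines : List String) (idxs : List Int) (dflt : Int) : Int :=
  match idxs with
  | [] => dflt
  | j :: rest =>
    if pvB_blank ((PySem.List.pyGet? lines j).getD "") then pvB_back lines rest dflt else j

def find_block_end_indent_py_alt (lines : List String) (start_idx : Int) : Int :=
  if start_idx ≥ PySem.List.len lines then start_idx
  else
    let d := pvB_indent ((PySem.List.pyGet? lines start_idx).getD "")
    let n := PySem.List.len lines
    let b := pvB_boundary lines d (PySem.List.pyRange (start_idx + 1) n 1) n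
    pvB_back lines (PySem.List.pyRange (start_idx + 1) b 1).reverse start_idx

-- ===== PRECONDITION & SPEC =====
-- Pre_ excludes exactly the inputs where A raises IndexError: start_idx < -len(lines).
def Pre_find_block_end_indent_py (lines : List String) (start_idx : Int) : Prop :=
  -(lines.length : Int) ≤ start_idx
instance (lines : List String) (start_idx : Int) : Decidable (Pre_find_block_end_indent_py lines start_idx) := by unfold Pre_find_block_end_indent_py; infer_instance

def pvWitness_find_block_end_indent_py : List String × Int := (["def f():", "  x = 1", "", "y"], 0)

def Spec_find_block_end_indent_py (lines : List String) (start_idx : Int) (out : Int) : Prop := out = find_block_end_indent_py_alt lines start_idx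
instance (lines : List String) (start_idx : Int) (out : Int) : Decidable (Spec_find_block_end_indent_py lines start_idx out) := by unfold Spec_find_block_end_indent_py; infer_instance

-- ===== CLAIM (what is proved, stated in full; the proofs are below) =====
def Claim_equal_find_block_end_indent_py : Prop := ∀ (lines : List String) (start_idx : Int), Dom_find_block_end_indent_py lines start_idx → Pre_find_block_end_indent_py lines start_idx → Spec_find_block_end_indent_py lines start_idx (find_block_end_indent_py lines start_idx)

-- ===== LEMMAS AND PROOFS =====

theorem pvGetLastD_cons (i last : Int) (M : List Int) :
    ((i :: M).getLast?).getD last = (M.getLast?).getD i := by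
  cases M with
  | nil => simp
  | cons x xs =>
    rw [List.getLast?_cons_cons]
    cases h : (x :: xs).getLast? with
    | none => simp [List.getLast?_eq_none_iff] at h
    | some j => simp

-- the line at index i, the "content" test and the "terminator" test
def pvLine (lines : List String) (i : Int) : String := (PySem.List.pyGet? lines i).getD ""
def pvContent (lines : List String) (i : Int) : Bool := !pvB_blank (pvLine lines i)
def pvTerm (lines : List String) (d : Int) (i : Int) : Bool :=
  !pvB_blank (pvLine lines i) && decide (pvB_indent (pvLine lines i) ≤ d)

-- A's loop returns the last content index before the first terminator, else its accumulator
theorem pvA_loop_spec (lines : List String) (d : Int) (idxs : List Int) (last : Int) :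
    pvA_loop lines d idxs last =
      (((idxs.takeWhile (fun i => !pvTerm lines d i)).filter (pvContent lines)).getLast?).getD last := by
  induction idxs generalizing last with
  | nil => simp [pvA_loop]
  | cons i rest ih =>
    by_cases hb : PySem.Str.strip (pvLine lines i) = ""
    · have ht : pvTerm lines d i = false := by simp [pvTerm, pvB_blank, hb]
      have hc : pvContent lines i = false := by simp [pvContent, pvB_blank, hb]
      simp [pvA_loop, pvLine] at *
      simp [hb, ht, hc, ih]
    · by_cases hi : pvB_indent (pvLine lines i) ≤ d
      · have ht : pvTerm lines d i = true := by simp [pvTerm, pvB_blank, hb, hi]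
        simp [pvA_loop, pvLine, pvA_indent, pvB_indent] at *
        simp [hb, hi, ht]
      · have ht : pvTerm lines d i = false := by simp [pvTerm, pvB_blank, hb, hi]
        have hc : pvContent lines i = true := by simp [pvContent, pvB_blank, hb]
        have hA : pvA_loop lines d (i :: rest) last = pvA_loop lines d rest i := by
          simp [pvA_loop, pvLine, pvA_indent, pvB_indent] at *
          simp [hb, hi]
        have hTW : (i :: rest).takeWhile (fun k => !pvTerm lines d k) =
            i :: rest.takeWhile (fun k => !pvTerm lines d k) := by
          simp [ht]
        rw [hA, ih, hTW, List.filter_cons_of_pos hc, pvGetLastD_cons]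

-- B's backward scan over a reversed list returns the last content index, else its default
theorem pvB_back_head (lines : List String) (idxs : List Int) (dflt : Int) :
    pvB_back lines idxs dflt = ((idxs.filter (pvContent lines)).head?).getD dflt := by
  induction idxs with
  | nil => simp [pvB_back]
  | cons j rest ih =>
    by_cases hb : pvB_blank (pvLine lines j) = true
    · have hc : pvContent lines j = false := by simp [pvContent, hb]
      simp [pvB_back, pvLine] at *
      simp [hb, hc, ih]
    · have hc : pvContent lines j = true := by simp [pvContent] at *; simp [hb]
      simp [pvB_back, pvLine] at *
      simp [hb, hc]

theorem pvB_back_spec (lines : List String) (idxs : List Int) (dflt : Int) :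
    pvB_back lines idxs.reverse dflt = ((idxs.filter (pvContent lines)).getLast?).getD dflt := by
  rw [pvB_back_head, List.filter_reverse, List.head?_reverse]

-- pass-1 boundary lies at or above the start of the range
theorem pvB_boundary_ge (lines : List String) (d : Int) (a n : Int) (h : a ≤ n) :
    a ≤ pvB_boundary lines d (PySem.List.pyRange a n 1) n := by
  by_cases hc : a < n
  · rw [PySem.List.pyRange_one_cons hc]
    have ih := pvB_boundary_ge lines d (a + 1) n (by omega)
    unfold pvB_boundary
    split_ifs <;> omega
  · rw [PySem.List.pyRange_one_eq_nil (by omega)]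
    simpa [pvB_boundary] using h
termination_by (n - a).toNat
decreasing_by omega

-- the prefix of the range before the first terminator is exactly the range up to the boundary
theorem pvB_boundary_takeWhile (lines : List String) (d : Int) (a n : Int) (h : a ≤ n) :
    (PySem.List.pyRange a n 1).takeWhile (fun i => !pvTerm lines d i) =
      PySem.List.pyRange a (pvB_boundary lines d (PySem.List.pyRange a n 1) n) 1 := by
  by_cases hc : a < n
  · rw [PySem.List.pyRange_one_cons hc]
    by_cases hT : pvTerm lines d a = true
    · have hblank : ¬ (pvB_blank (pvLine lines a) = true) := by
        simp [pvTerm] at hT; simp [hT.1]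
      have hind : pvB_indent (pvLine lines a) ≤ d := by
        simp [pvTerm] at hT; exact hT.2
      have hbd : pvB_boundary lines d (a :: PySem.List.pyRange (a+1) n 1) n = a := by
        unfold pvB_boundary; simp [pvLine] at *; simp [hblank, hind]
      rw [hbd]
      simp [hT, PySem.List.pyRange_one_eq_nil (le_refl a)]
    · have hbd : pvB_boundary lines d (a :: PySem.List.pyRange (a+1) n 1) n =
          pvB_boundary lines d (PySem.List.pyRange (a+1) n 1) n := by
        simp only [pvTerm, pvLine, Bool.and_eq_true, Bool.not_eq_true', decide_eq_true_eq] at hT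
        simp only [pvB_boundary]
        split_ifs with h1 h2
        · rfl
        · exact absurd ⟨by simpa using h1, h2⟩ hT
        · rfl
      have hge := pvB_boundary_ge lines d (a + 1) n (by omega)
      rw [hbd]
      have ih := pvB_boundary_takeWhile lines d (a + 1) n (by omega)
      simp only [List.takeWhile_cons]
      simp only [Bool.not_eq_true] at hT
      simp [hT, ih, PySem.List.pyRange_one_cons (show a < pvB_boundary lines d (PySem.List.pyRange (a+1) n 1) n by omega)]
  · rw [PySem.List.pyRange_one_eq_nil (by omega)]
    simp [pvB_boundary, PySem.List.pyRange_one_eq_nil (show n ≤ a by omega)]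
termination_by (n - a).toNat
decreasing_by omega

-- ===== VERDICT (by name: the statement is the Claim_ definition above) =====
theorem find_block_end_indent_py_spec : Claim_equal_find_block_end_indent_py := by
  intro lines start_idx _ _
  unfold Spec_find_block_end_indent_py find_block_end_indent_py find_block_end_indent_py_alt
  by_cases hge : (lines.length : Int) ≤ start_idx
  · simp [PySem.List.len_eq, hge]
  · have hle : start_idx + 1 ≤ (lines.length : Int) := by omega
    simp only [PySem.List.len_eq, hge, if_false]
    rw [pvA_loop_spec, pvB_back_spec,
        pvB_boundary_takeWhile lines _ (start_idx + 1) ((lines.length : Int)) hle]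
    simp only [pvA_indent, pvB_indent]
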